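-- pv_equiv track=rewrite | github.com/jfitz/cardpunch | cardpunch.py | punch_card_svg
-- ===== SOURCE A (Python) =====
-- characters = {
-- 	' ': [0,0,0,0,0,0,0,0,0,0,0,0],
-- 	'0': [0,0,1,0,0,0,0,0,0,0,0,0],
-- 	'1': [0,0,0,1,0,0,0,0,0,0,0,0],
-- 	'2': [0,0,0,0,1,0,0,0,0,0,0,0],
-- 	'3': [0,0,0,0,0,1,0,0,0,0,0,0],
-- 	'4': [0,0,0,0,0,0,1,0,0,0,0,0],
-- 	'5': [0,0,0,0,0,0,0,1,0,0,0,0],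
-- 	'6': [0,0,0,0,0,0,0,0,1,0,0,0],
-- 	'7': [0,0,0,0,0,0,0,0,0,1,0,0],
-- 	'8': [0,0,0,0,0,0,0,0,0,0,1,0],
-- 	'9': [0,0,0,0,0,0,0,0,0,0,0,1],
-- 	'A': [1,0,0,1,0,0,0,0,0,0,0,0],
-- 	'B': [1,0,0,0,1,0,0,0,0,0,0,0],
-- 	'C': [1,0,0,0,0,1,0,0,0,0,0,0],
-- 	'D': [1,0,0,0,0,0,1,0,0,0,0,0],
-- 	'E': [1,0,0,0,0,0,0,1,0,0,0,0],
-- 	'F': [1,0,0,0,0,0,0,0,1,0,0,0],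
-- 	'G': [1,0,0,0,0,0,0,0,0,1,0,0],
-- 	'H': [1,0,0,0,0,0,0,0,0,0,1,0],
-- 	'I': [1,0,0,0,0,0,0,0,0,0,0,1],
-- 	'J': [0,1,0,1,0,0,0,0,0,0,0,0],
-- 	'K': [0,1,0,0,1,0,0,0,0,0,0,0],
-- 	'L': [0,1,0,0,0,1,0,0,0,0,0,0],
-- 	'M': [0,1,0,0,0,0,1,0,0,0,0,0],
-- 	'N': [0,1,0,0,0,0,0,1,0,0,0,0],
-- 	'O': [0,1,0,0,0,0,0,0,1,0,0,0],
-- 	'P': [0,1,0,0,0,0,0,0,0,1,0,0],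
-- 	'Q': [0,1,0,0,0,0,0,0,0,0,1,0],
-- 	'R': [0,1,0,0,0,0,0,0,0,0,0,1],
-- 	'S': [0,0,1,0,1,0,0,0,0,0,0,0],
-- 	'T': [0,0,1,0,0,1,0,0,0,0,0,0],
-- 	'U': [0,0,1,0,0,0,1,0,0,0,0,0],
-- 	'V': [0,0,1,0,0,0,0,1,0,0,0,0],
-- 	'W': [0,0,1,0,0,0,0,0,1,0,0,0],
-- 	'X': [0,0,1,0,0,0,0,0,0,1,0,0],
-- 	'Y': [0,0,1,0,0,0,0,0,0,0,1,0],
-- 	'Z': [0,0,1,0,0,0,0,0,0,0,0,1],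
-- 	'&': [1,0,0,0,1,0,0,0,0,0,1,0],
-- 	'\xa2': [1,0,0,0,1,0,0,0,0,0,1,0],
-- 	'.': [1,0,0,0,0,1,0,0,0,0,1,0],
-- 	'<': [1,0,0,0,0,0,1,0,0,0,1,0],
-- 	'(': [1,0,0,0,0,0,0,1,0,0,1,0],
-- 	'+': [1,0,0,0,0,0,0,0,1,0,1,0],
-- 	'|': [1,0,0,0,0,0,0,0,0,1,1,0],
-- 	'!': [0,1,0,0,1,0,0,0,0,0,1,0],
-- 	'$': [0,1,0,0,0,1,0,0,0,0,1,0],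
-- 	'*': [0,1,0,0,0,0,1,0,0,0,1,0],
-- 	')': [0,1,0,0,0,0,0,1,0,0,1,0],
-- 	';': [0,1,0,0,0,0,0,0,1,0,1,0],
-- 	'\xac': [0,1,0,0,0,0,0,0,0,1,1,0],
-- 	'/': [0,0,1,1,0,0,0,0,0,0,1,0],
-- 	'-': [0,0,1,0,1,0,0,0,0,0,1,0],
-- 	',': [0,0,1,0,0,1,0,0,0,0,1,0],
-- 	'%': [0,0,1,0,0,0,1,0,0,0,1,0],
-- 	'_': [0,0,1,0,0,0,0,1,0,0,1,0],
-- 	'>': [0,0,1,0,0,0,0,0,1,0,1,0],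
-- 	'?': [0,0,1,0,0,0,0,0,0,1,1,0],
-- 	':': [0,0,0,0,1,0,0,0,0,0,1,0],
-- 	'#': [0,0,0,0,0,1,0,0,0,0,1,0],
-- 	'@': [0,0,0,0,0,0,1,0,0,0,1,0],
-- 	"'": [0,0,0,0,0,0,0,1,0,0,1,0],
-- 	'=': [0,0,0,0,0,0,0,0,1,0,1,0],
-- 	'"': [0,0,0,0,0,0,0,0,0,1,1,0]
-- }
--
-- def character_to_bits(character):
-- 	if character in characters.keys():
-- 		return characters[character]
-- 	return characters[' ']
--
-- def punch_card_svg(text):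
-- 	svg = []
-- 	svg.append('<?xml version="1.0" standalone="no"?>')
-- 	svg.append('<!DOCTYPE svg PUBLIC "-//W3C//DTD SVG 20010904//EN" "http://www.w3.org/TR/2001/REC-SVG-20010904/DTD/svg10.dtd">')
-- 	svg.append('<svg version="1.0" xmlns="http://www.w3.org/2000/svg" width="607pt" height="270pt" viewBox="0 0 607 270" preserveAspectRatio="xMidYMid meet">')
-- 	svg.append('<metadata>Created by CardPunch on Google App Engine (cardpunch.appspot.com)</metadata>')
-- 	svg.append('<rect x="1" y="1" width="605" height="268" fill="white" stroke="black" stroke-width="2"></rect>')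
-- 	column = 0
-- 	for c in text:
-- 		x = 10 + column * 7
-- 		bits = character_to_bits(c)
-- 		zone = 0
-- 		for bit in bits:
-- 			y = 16 + zone * 21
-- 			if bit == 1:
-- 				svg.append('<rect x="' + str(x) + '" y="' + str(y) + '" width="4" height="12" fill="black"></rect>')
-- 			zone += 1
-- 		column += 1
-- 	svg.append('</svg>')
-- 	return "".join(svg)
-- ===== SOURCE B (Python) =====
-- # Sparse re-implementation: per-character sorted punch-index lists instead of dense 12-bit vectors;
-- # the inner loop visits only punched zones (no per-bit scan/branch). Objective: alternative/simpler traversal.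
--
-- HOLES = {
--     ' ': [],
--     '0': [2],
--     '1': [3],
--     '2': [4],
--     '3': [5],
--     '4': [6],
--     '5': [7],
--     '6': [8],
--     '7': [9],
--     '8': [10],
--     '9': [11],
--     'A': [0, 3],
--     'B': [0, 4],
--     'C': [0, 5],
--     'D': [0, 6],
--     'E': [0, 7],
--     'F': [0, 8],
--     'G': [0, 9],
--     'H': [0, 10],
--     'I': [0, 11],
--     'J': [1, 3],
--     'K': [1, 4],
--     'L': [1, 5],
--     'M': [1, 6],
--     'N': [1, 7],
--     'O': [1, 8],
--     'P': [1, 9],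
--     'Q': [1, 10],
--     'R': [1, 11],
--     'S': [2, 4],
--     'T': [2, 5],
--     'U': [2, 6],
--     'V': [2, 7],
--     'W': [2, 8],
--     'X': [2, 9],
--     'Y': [2, 10],
--     'Z': [2, 11],
--     '&': [0, 4, 10],
--     '¢': [0, 4, 10],
--     '.': [0, 5, 10],
--     '<': [0, 6, 10],
--     '(': [0, 7, 10],
--     '+': [0, 8, 10],
--     '|': [0, 9, 10],
--     '!': [1, 4, 10],
--     '$': [1, 5, 10],
--     '*': [1, 6, 10],
--     ')': [1, 7, 10],
--     ';': [1, 8, 10],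
--     '¬': [1, 9, 10],
--     '/': [2, 3, 10],
--     '-': [2, 4, 10],
--     ',': [2, 5, 10],
--     '%': [2, 6, 10],
--     '_': [2, 7, 10],
--     '>': [2, 8, 10],
--     '?': [2, 9, 10],
--     ':': [4, 10],
--     '#': [5, 10],
--     '@': [6, 10],
--     "'": [7, 10],
--     '=': [8, 10],
--     '"': [9, 10],
-- }
--
-- PROLOG = [
--     '<?xml version="1.0" standalone="no"?>',
--     '<!DOCTYPE svg PUBLIC "-//W3C//DTD SVG 20010904//EN" "http://www.w3.org/TR/2001/REC-SVG-20010904/DTD/svg10.dtd">',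
--     '<svg version="1.0" xmlns="http://www.w3.org/2000/svg" width="607pt" height="270pt" viewBox="0 0 607 270" preserveAspectRatio="xMidYMid meet">',
--     '<metadata>Created by CardPunch on Google App Engine (cardpunch.appspot.com)</metadata>',
--     '<rect x="1" y="1" width="605" height="268" fill="white" stroke="black" stroke-width="2"></rect>',
-- ]
--
--
-- def punch_card_svg(text):
--     parts = list(PROLOG)
--     for column, c in enumerate(text):
--         x = 10 + 7 * column
--         for z in HOLES.get(c, ()):
--             parts.append('<rect x="%d" y="%d" width="4" height="12" fill="black"></rect>' % (x, 16 + 21 * z))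
--     parts.append('</svg>')
--     return ''.join(parts)
-- ===== Notes on version B (the rewrite author's own statement) =====
-- stated objective: faster
-- what changed: Replaces the dense 12-element bit vectors and the scan-all-12-zones inner loop with a sparse table mapping each character to its ascending list of punched zone indices, so the inner loop iterates only over punched positions (and the column comes from enumerate instead of a manual counter).
import Mathlib
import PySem

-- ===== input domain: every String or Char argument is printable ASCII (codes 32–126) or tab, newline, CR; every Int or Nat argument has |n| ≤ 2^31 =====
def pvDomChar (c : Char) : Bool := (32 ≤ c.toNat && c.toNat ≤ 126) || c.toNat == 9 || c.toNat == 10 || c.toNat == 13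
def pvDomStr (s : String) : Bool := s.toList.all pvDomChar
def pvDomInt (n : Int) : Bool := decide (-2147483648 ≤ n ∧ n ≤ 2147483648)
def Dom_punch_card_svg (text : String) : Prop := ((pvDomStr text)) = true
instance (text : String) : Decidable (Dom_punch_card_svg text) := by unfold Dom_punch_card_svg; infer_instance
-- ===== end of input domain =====

-- B replaces the dense 12-bit zone vectors and the scan-all-12-zones inner loop by a sparse
-- table of punched zone indices, so the inner loop visits only punched positions (objective: alternative).

-- ===== PORT A =====
-- shared literal pieces: the hole <rect> string both Pythons build (A by '+'-concatenation, B by '%d' formatting,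
-- identical for ints) and the five fixed prolog lines
def pcsRect (x y : Int) : String :=
  "<rect x=\"" ++ PySem.Int.toStr x ++ "\" y=\"" ++ PySem.Int.toStr y ++ "\" width=\"4\" height=\"12\" fill=\"black\"></rect>"

def pcsCharactersL : List (Char × List Int) := [
  (' ', [0, 0, 0, 0, 0, 0, 0, 0, 0, 0, 0, 0]),
  ('0', [0, 0, 1, 0, 0, 0, 0, 0, 0, 0, 0, 0]),
  ('1', [0, 0, 0, 1, 0, 0, 0, 0, 0, 0, 0, 0]),
  ('2', [0, 0, 0, 0, 1, 0, 0, 0, 0, 0, 0, 0]),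
  ('3', [0, 0, 0, 0, 0, 1, 0, 0, 0, 0, 0, 0]),
  ('4', [0, 0, 0, 0, 0, 0, 1, 0, 0, 0, 0, 0]),
  ('5', [0, 0, 0, 0, 0, 0, 0, 1, 0, 0, 0, 0]),
  ('6', [0, 0, 0, 0, 0, 0, 0, 0, 1, 0, 0, 0]),
  ('7', [0, 0, 0, 0, 0, 0, 0, 0, 0, 1, 0, 0]),
  ('8', [0, 0, 0, 0, 0, 0, 0, 0, 0, 0, 1, 0]),
  ('9', [0, 0, 0, 0, 0, 0, 0, 0, 0, 0, 0, 1]),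
  ('A', [1, 0, 0, 1, 0, 0, 0, 0, 0, 0, 0, 0]),
  ('B', [1, 0, 0, 0, 1, 0, 0, 0, 0, 0, 0, 0]),
  ('C', [1, 0, 0, 0, 0, 1, 0, 0, 0, 0, 0, 0]),
  ('D', [1, 0, 0, 0, 0, 0, 1, 0, 0, 0, 0, 0]),
  ('E', [1, 0, 0, 0, 0, 0, 0, 1, 0, 0, 0, 0]),
  ('F', [1, 0, 0, 0, 0, 0, 0, 0, 1, 0, 0, 0]),
  ('G', [1, 0, 0, 0, 0, 0, 0, 0, 0, 1, 0, 0]),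
  ('H', [1, 0, 0, 0, 0, 0, 0, 0, 0, 0, 1, 0]),
  ('I', [1, 0, 0, 0, 0, 0, 0, 0, 0, 0, 0, 1]),
  ('J', [0, 1, 0, 1, 0, 0, 0, 0, 0, 0, 0, 0]),
  ('K', [0, 1, 0, 0, 1, 0, 0, 0, 0, 0, 0, 0]),
  ('L', [0, 1, 0, 0, 0, 1, 0, 0, 0, 0, 0, 0]),
  ('M', [0, 1, 0, 0, 0, 0, 1, 0, 0, 0, 0, 0]),
  ('N', [0, 1, 0, 0, 0, 0, 0, 1, 0, 0, 0, 0]),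
  ('O', [0, 1, 0, 0, 0, 0, 0, 0, 1, 0, 0, 0]),
  ('P', [0, 1, 0, 0, 0, 0, 0, 0, 0, 1, 0, 0]),
  ('Q', [0, 1, 0, 0, 0, 0, 0, 0, 0, 0, 1, 0]),
  ('R', [0, 1, 0, 0, 0, 0, 0, 0, 0, 0, 0, 1]),
  ('S', [0, 0, 1, 0, 1, 0, 0, 0, 0, 0, 0, 0]),
  ('T', [0, 0, 1, 0, 0, 1, 0, 0, 0, 0, 0, 0]),
  ('U', [0, 0, 1, 0, 0, 0, 1, 0, 0, 0, 0, 0]),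
  ('V', [0, 0, 1, 0, 0, 0, 0, 1, 0, 0, 0, 0]),
  ('W', [0, 0, 1, 0, 0, 0, 0, 0, 1, 0, 0, 0]),
  ('X', [0, 0, 1, 0, 0, 0, 0, 0, 0, 1, 0, 0]),
  ('Y', [0, 0, 1, 0, 0, 0, 0, 0, 0, 0, 1, 0]),
  ('Z', [0, 0, 1, 0, 0, 0, 0, 0, 0, 0, 0, 1]),
  ('&', [1, 0, 0, 0, 1, 0, 0, 0, 0, 0, 1, 0]),
  ('¢', [1, 0, 0, 0, 1, 0, 0, 0, 0, 0, 1, 0]),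
  ('.', [1, 0, 0, 0, 0, 1, 0, 0, 0, 0, 1, 0]),
  ('<', [1, 0, 0, 0, 0, 0, 1, 0, 0, 0, 1, 0]),
  ('(', [1, 0, 0, 0, 0, 0, 0, 1, 0, 0, 1, 0]),
  ('+', [1, 0, 0, 0, 0, 0, 0, 0, 1, 0, 1, 0]),
  ('|', [1, 0, 0, 0, 0, 0, 0, 0, 0, 1, 1, 0]),
  ('!', [0, 1, 0, 0, 1, 0, 0, 0, 0, 0, 1, 0]),
  ('$', [0, 1, 0, 0, 0, 1, 0, 0, 0, 0, 1, 0]),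
  ('*', [0, 1, 0, 0, 0, 0, 1, 0, 0, 0, 1, 0]),
  (')', [0, 1, 0, 0, 0, 0, 0, 1, 0, 0, 1, 0]),
  (';', [0, 1, 0, 0, 0, 0, 0, 0, 1, 0, 1, 0]),
  ('¬', [0, 1, 0, 0, 0, 0, 0, 0, 0, 1, 1, 0]),
  ('/', [0, 0, 1, 1, 0, 0, 0, 0, 0, 0, 1, 0]),
  ('-', [0, 0, 1, 0, 1, 0, 0, 0, 0, 0, 1, 0]),
  (',', [0, 0, 1, 0, 0, 1, 0, 0, 0, 0, 1, 0]),
  ('%', [0, 0, 1, 0, 0, 0, 1, 0, 0, 0, 1, 0]),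
  ('_', [0, 0, 1, 0, 0, 0, 0, 1, 0, 0, 1, 0]),
  ('>', [0, 0, 1, 0, 0, 0, 0, 0, 1, 0, 1, 0]),
  ('?', [0, 0, 1, 0, 0, 0, 0, 0, 0, 1, 1, 0]),
  (':', [0, 0, 0, 0, 1, 0, 0, 0, 0, 0, 1, 0]),
  ('#', [0, 0, 0, 0, 0, 1, 0, 0, 0, 0, 1, 0]),
  ('@', [0, 0, 0, 0, 0, 0, 1, 0, 0, 0, 1, 0]),
  ('\'', [0, 0, 0, 0, 0, 0, 0, 1, 0, 0, 1, 0]),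
  ('=', [0, 0, 0, 0, 0, 0, 0, 0, 1, 0, 1, 0]),
  ('"', [0, 0, 0, 0, 0, 0, 0, 0, 0, 1, 1, 0])
]

-- module-level dict 'characters'
def pcsCharacters : PySem.Dict Char (List Int) := PySem.Dict.ofList pcsCharactersL

-- def character_to_bits: 'if character in characters.keys(): return characters[character]; return characters[\' \']'
-- (the guarded characters[character] is the get? hit; the miss returns characters[' '])
def character_to_bits (c : Char) : List Int :=
  match PySem.Dict.get? pcsCharacters c with
  | some bits => bits
  | none => (PySem.Dict.get? pcsCharacters ' ').getD []

-- inner 'for bit in bits' loop body, state = (svg, zone)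
def pcsStepBit (x : Int) (st : List String × Int) (bit : Int) : List String × Int :=
  let y : Int := 16 + st.2 * 21
  (if bit == 1 then st.1 ++ [pcsRect x y] else st.1, st.2 + 1)

-- outer 'for c in text' loop body, state = (svg, column)
def pcsStepChar (st : List String × Int) (c : Char) : List String × Int :=
  let x : Int := 10 + st.2 * 7
  let bits := character_to_bits c
  let inner := bits.foldl (pcsStepBit x) (st.1, 0)
  (inner.1, st.2 + 1)

def punch_card_svg (text : String) : String :=
  -- svg starts as the five appended prolog lines; then the loop, then '</svg>' and ''.join
  PySem.Str.join "" ((text.toList.foldl pcsStepChar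
    (["<?xml version=\"1.0\" standalone=\"no\"?>",
      "<!DOCTYPE svg PUBLIC \"-//W3C//DTD SVG 20010904//EN\" \"http://www.w3.org/TR/2001/REC-SVG-20010904/DTD/svg10.dtd\">",
      "<svg version=\"1.0\" xmlns=\"http://www.w3.org/2000/svg\" width=\"607pt\" height=\"270pt\" viewBox=\"0 0 607 270\" preserveAspectRatio=\"xMidYMid meet\">",
      "<metadata>Created by CardPunch on Google App Engine (cardpunch.appspot.com)</metadata>",
      "<rect x=\"1\" y=\"1\" width=\"605\" height=\"268\" fill=\"white\" stroke=\"black\" stroke-width=\"2\"></rect>"],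
     (0 : Int))).1 ++ ["</svg>"])

-- ===== PORT B =====
def pcsHolesL : List (Char × List Int) := [
  (' ', []),
  ('0', [2]),
  ('1', [3]),
  ('2', [4]),
  ('3', [5]),
  ('4', [6]),
  ('5', [7]),
  ('6', [8]),
  ('7', [9]),
  ('8', [10]),
  ('9', [11]),
  ('A', [0, 3]),
  ('B', [0, 4]),
  ('C', [0, 5]),
  ('D', [0, 6]),
  ('E', [0, 7]),
  ('F', [0, 8]),
  ('G', [0, 9]),
  ('H', [0, 10]),
  ('I', [0, 11]),
  ('J', [1, 3]),
  ('K', [1, 4]),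
  ('L', [1, 5]),
  ('M', [1, 6]),
  ('N', [1, 7]),
  ('O', [1, 8]),
  ('P', [1, 9]),
  ('Q', [1, 10]),
  ('R', [1, 11]),
  ('S', [2, 4]),
  ('T', [2, 5]),
  ('U', [2, 6]),
  ('V', [2, 7]),
  ('W', [2, 8]),
  ('X', [2, 9]),
  ('Y', [2, 10]),
  ('Z', [2, 11]),
  ('&', [0, 4, 10]),
  ('¢', [0, 4, 10]),
  ('.', [0, 5, 10]),
  ('<', [0, 6, 10]),
  ('(', [0, 7, 10]),
  ('+', [0, 8, 10]),
  ('|', [0, 9, 10]),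
  ('!', [1, 4, 10]),
  ('$', [1, 5, 10]),
  ('*', [1, 6, 10]),
  (')', [1, 7, 10]),
  (';', [1, 8, 10]),
  ('¬', [1, 9, 10]),
  ('/', [2, 3, 10]),
  ('-', [2, 4, 10]),
  (',', [2, 5, 10]),
  ('%', [2, 6, 10]),
  ('_', [2, 7, 10]),
  ('>', [2, 8, 10]),
  ('?', [2, 9, 10]),
  (':', [4, 10]),
  ('#', [5, 10]),
  ('@', [6, 10]),
  ('\'', [7, 10]),
  ('=', [8, 10]),
  ('"', [9, 10])
]

-- module-level dict HOLES: each character's ascending list of punched zone indices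
def pcsHoles : PySem.Dict Char (List Int) := PySem.Dict.ofList pcsHolesL

def pcsProlog : List String := [
  "<?xml version=\"1.0\" standalone=\"no\"?>",
  "<!DOCTYPE svg PUBLIC \"-//W3C//DTD SVG 20010904//EN\" \"http://www.w3.org/TR/2001/REC-SVG-20010904/DTD/svg10.dtd\">",
  "<svg version=\"1.0\" xmlns=\"http://www.w3.org/2000/svg\" width=\"607pt\" height=\"270pt\" viewBox=\"0 0 607 270\" preserveAspectRatio=\"xMidYMid meet\">",
  "<metadata>Created by CardPunch on Google App Engine (cardpunch.appspot.com)</metadata>",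
  "<rect x=\"1\" y=\"1\" width=\"605\" height=\"268\" fill=\"white\" stroke=\"black\" stroke-width=\"2\"></rect>"]

-- 'for column, c in enumerate(text): for z in HOLES.get(c, ()): parts.append(...)'
def pcsStepB (parts : List String) (ic : Int × Char) : List String :=
  let x : Int := 10 + 7 * ic.1
  parts ++ ((PySem.Dict.get? pcsHoles ic.2).getD []).map (fun z => pcsRect x (16 + 21 * z))

def punch_card_svg_alt (text : String) : String :=
  PySem.Str.join "" (((PySem.List.enumerate text.toList 0).foldl pcsStepB pcsProlog) ++ ["</svg>"])

-- ===== PRECONDITION & SPEC =====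
def Spec_punch_card_svg (text : String) (out : String) : Prop := out = punch_card_svg_alt text
instance (text : String) (out : String) : Decidable (Spec_punch_card_svg text out) := by unfold Spec_punch_card_svg; infer_instance

-- ===== CLAIM (what is proved, stated in full; the proofs are below) =====
def Claim_equal_punch_card_svg : Prop := ∀ (text : String), Dom_punch_card_svg text → Spec_punch_card_svg text (punch_card_svg text)

-- ===== LEMMAS AND PROOFS =====

-- rects produced by A's dense inner loop starting at zone z
def pcsRects (x : Int) : List Int → Int → List String
  | [], _ => []
  | b :: bs, z => (if b == 1 then [pcsRect x (16 + z * 21)] else []) ++ pcsRects x bs (z + 1)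

-- indices of the 1-bits, starting at zone z
def pcsIdx : List Int → Int → List Int
  | [], _ => []
  | b :: bs, z => if b == 1 then z :: pcsIdx bs (z + 1) else pcsIdx bs (z + 1)

-- the hole rects for the whole text starting at column n
def pcsBody : List Char → Int → List String
  | [], _ => []
  | c :: cs, n =>
      ((PySem.Dict.get? pcsHoles c).getD []).map (fun z => pcsRect (10 + 7 * n) (16 + 21 * z)) ++ pcsBody cs (n + 1)

lemma pcs_inner_fold (x : Int) (bits : List Int) (svg : List String) (z : Int) :
    bits.foldl (pcsStepBit x) (svg, z) = (svg ++ pcsRects x bits z, z + bits.length) := by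
  induction bits generalizing svg z with
  | nil => simp [pcsRects]
  | cons b bs ih =>
      simp only [List.foldl_cons, pcsStepBit, pcsRects]
      rw [ih]
      simp only [Prod.mk.injEq]
      refine ⟨?_, by rw [List.length_cons]; push_cast; omega⟩
      by_cases h : b == 1 <;> simp [h]

lemma pcs_rects_idx (x : Int) (bits : List Int) (z : Int) :
    pcsRects x bits z = (pcsIdx bits z).map (fun i => pcsRect x (16 + 21 * i)) := by
  induction bits generalizing z with
  | nil => simp [pcsRects, pcsIdx]
  | cons b bs ih =>
      by_cases h : b == 1 <;> simp [pcsRects, pcsIdx, h, ih, Int.mul_comm]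

lemma pcs_get?_map_idx (l : List (Char × List Int)) (c : Char) :
    PySem.Dict.get? (PySem.Dict.mk (l.map (fun p => (p.1, pcsIdx p.2 0)))) c
      = (PySem.Dict.get? (PySem.Dict.mk l) c).map (fun b => pcsIdx b 0) := by
  induction l with
  | nil => simp [PySem.Dict.get?]
  | cons p l ih =>
      simp only [List.map_cons]
      rw [PySem.Dict.get?_mk_cons, PySem.Dict.get?_mk_cons]
      by_cases h : p.1 == c <;> simp [h, ih]

set_option maxRecDepth 40000 in
lemma pcs_characters_mk : pcsCharacters = PySem.Dict.mk pcsCharactersL := by decide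

set_option maxRecDepth 40000 in
lemma pcs_holes_mk : pcsHoles = PySem.Dict.mk (pcsCharactersL.map (fun p => (p.1, pcsIdx p.2 0))) := by decide

lemma pcs_get_holes (c : Char) :
    (PySem.Dict.get? pcsHoles c).getD [] = pcsIdx (character_to_bits c) 0 := by
  rw [pcs_holes_mk, pcs_get?_map_idx]
  unfold character_to_bits
  rw [pcs_characters_mk]
  cases h : PySem.Dict.get? (PySem.Dict.mk pcsCharactersL) c with
  | some b => simp
  | none => simp only [Option.map_none, Option.getD_none]; decide

lemma pcs_foldA (cs : List Char) (svg : List String) (n : Int) :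
    (cs.foldl pcsStepChar (svg, n)).1 = svg ++ pcsBody cs n := by
  induction cs generalizing svg n with
  | nil => simp [pcsBody]
  | cons c cs ih =>
      simp only [List.foldl_cons, pcsStepChar, pcs_inner_fold]
      rw [ih, pcsBody, pcs_rects_idx, pcs_get_holes, Int.mul_comm, List.append_assoc]

lemma pcs_foldB (cs : List Char) (parts : List String) (n : Int) :
    (PySem.List.enumerate cs n).foldl pcsStepB parts = parts ++ pcsBody cs n := by
  induction cs generalizing parts n with
  | nil => simp [PySem.List.enumerate_nil, pcsBody]
  | cons c cs ih =>
      rw [PySem.List.enumerate_cons]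
      simp only [List.foldl_cons, pcsStepB]
      rw [ih, pcsBody, List.append_assoc]

-- ===== VERDICT (by name: the statement is the Claim_ definition above) =====
theorem punch_card_svg_spec : Claim_equal_punch_card_svg := by
  intro text _
  show punch_card_svg text = punch_card_svg_alt text
  unfold punch_card_svg punch_card_svg_alt
  rw [pcs_foldA, pcs_foldB]
  rfl
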